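-- pv_equiv track=rewrite | github.com/Labpro-21/if1210-2024-tubes-k08-b | src/potion.py | indexPot
-- ===== SOURCE A (Python) =====
-- def indexPot(userInventory) :
--   indexStr = 0
--   indexRes = 0
--   indexHeal = 0
--
--   for i in userInventory :
--     if i[1] != 'Strength Potion' :                                        # untuk mencari indexStr dengan menambahkan indexStr secara berulang
--       indexStr += 1
--     elif i[1] == 'Strength Potion' :                                      # untuk mendapatkan indexStr dengan menghentikan penambahan indexStr
--       break
--
--   for i in userInventory :
--     if i[1] != 'Resilience Potion' :
--       indexRes += 1
--     elif i[1] == 'Resilience Potion' :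
--       break
--
--   for i in userInventory :
--     if i[1] != 'Healing Potion' :
--       indexHeal += 1
--     elif i[1] == 'Healing Potion' :
--       break
--
--   return [indexStr, indexRes, indexHeal]
-- ===== SOURCE B (Python) =====
-- def indexPot(userInventory):
--     n = len(userInventory)
--     s = r = h = None
--     for i, item in enumerate(userInventory):
--         if s is not None and r is not None and h is not None:
--             break
--         t = item[1]
--         if s is None and t == 'Strength Potion':
--             s = i
--         if r is None and t == 'Resilience Potion':
--             r = i
--         if h is None and t == 'Healing Potion':
--             h = i
--     return [n if s is None else s,
--             n if r is None else r,
--             n if h is None else h]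
-- ===== Notes on version B (the rewrite author's own statement) =====
-- stated objective: simpler
-- what changed: Replaces A's three separate count-until-match loops over the inventory by a single enumerate pass that records the first index of each of the three potion types in sentinels (stopping once all three are found), defaulting unmatched types to len(userInventory).
import Mathlib
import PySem

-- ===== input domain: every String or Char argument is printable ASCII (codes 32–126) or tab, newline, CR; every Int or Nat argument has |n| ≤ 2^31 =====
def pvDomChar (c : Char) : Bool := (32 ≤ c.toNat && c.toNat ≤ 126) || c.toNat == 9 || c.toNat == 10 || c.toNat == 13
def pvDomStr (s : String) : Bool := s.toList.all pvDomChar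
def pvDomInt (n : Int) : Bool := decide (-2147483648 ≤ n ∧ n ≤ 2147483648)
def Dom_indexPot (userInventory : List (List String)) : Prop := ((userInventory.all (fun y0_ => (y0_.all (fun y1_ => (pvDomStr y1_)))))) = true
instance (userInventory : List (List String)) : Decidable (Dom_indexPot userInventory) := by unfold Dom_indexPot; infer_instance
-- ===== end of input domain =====

-- B replaces A's three count-until-match loops by a single pass recording each type's first index, stopping once all three are found (objective: simpler). Equivalence is about the return value only.


-- ===== PORT A =====
-- A's loop 'for i in inv: if i[1] != name: cnt += 1 elif i[1] == name: break'
-- i[1] ported with pyGet?; the getD "" default is only reached where Python A already raised, outside Pre_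
def countUntil (name : String) : List (List String) → Int
  | [] => 0
  | item :: rest =>
    if ((PySem.List.pyGet? item 1).getD "") ≠ name then 1 + countUntil name rest
    else 0

def indexPot (userInventory : List (List String)) : List Int :=
  [countUntil "Strength Potion" userInventory,
   countUntil "Resilience Potion" userInventory,
   countUntil "Healing Potion" userInventory]

-- ===== PORT B =====
-- B's single enumerate loop: index counter i, three Option sentinels, early break when all three are set
def scanPot (i : Int) (s r h : Option Int) : List (List String) → Option Int × Option Int × Option Int
  | [] => (s, r, h)
  | item :: rest =>
    if s ≠ none ∧ r ≠ none ∧ h ≠ none then (s, r, h)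
    else
      let t := (PySem.List.pyGet? item 1).getD ""
      scanPot (i + 1)
        (if s = none ∧ t = "Strength Potion" then some i else s)
        (if r = none ∧ t = "Resilience Potion" then some i else r)
        (if h = none ∧ t = "Healing Potion" then some i else h)
        rest

def indexPot_alt (userInventory : List (List String)) : List Int :=
  let n : Int := userInventory.length
  let res := scanPot 0 none none none userInventory
  [res.1.getD n, res.2.1.getD n, res.2.2.getD n]

-- ===== PRECONDITION & SPEC =====
-- Pre_ excludes exactly the inputs where Python A raises IndexError: an item with fewer than 2 fields
-- reached before all three potion names have occurred (names occurring strictly before it end every loop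
-- by break first, so A returns normally on short items after all three first matches; B raises there too).
def Pre_indexPot (userInventory : List (List String)) : Prop :=
  ∀ i : Fin userInventory.length, (userInventory.get i).length < 2 →
    ∀ name ∈ ["Strength Potion", "Resilience Potion", "Healing Potion"],
      ∃ j : Fin userInventory.length, j.val < i.val ∧ (userInventory.get j)[1]? = some name
instance (userInventory : List (List String)) : Decidable (Pre_indexPot userInventory) := by unfold Pre_indexPot; infer_instance
def pvWitness_indexPot : List (List String) :=
  [["p1", "Healing Potion"], ["p2", "Strength Potion"], ["p3", "Resilience Potion"], ["tail"]]

def Spec_indexPot (userInventory : List (List String)) (out : List Int) : Prop := out = indexPot_alt userInventory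
instance (userInventory : List (List String)) (out : List Int) : Decidable (Spec_indexPot userInventory out) := by unfold Spec_indexPot; infer_instance

-- ===== CLAIM (what is proved, stated in full; the proofs are below) =====
def Claim_equal_indexPot : Prop := ∀ (userInventory : List (List String)), Dom_indexPot userInventory → Pre_indexPot userInventory → Spec_indexPot userInventory (indexPot userInventory)

-- ===== LEMMAS AND PROOFS =====

-- first-match finder: the value each sentinel of B's scan ends with
def firstIdx (name : String) (i : Int) : List (List String) → Option Int
  | [] => none
  | item :: rest =>
    if ((PySem.List.pyGet? item 1).getD "") = name then some i else firstIdx name (i + 1) rest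

theorem scanPot_eq (l : List (List String)) : ∀ (i : Int) (s r h : Option Int),
    scanPot i s r h l =
      (s.orElse (fun _ => firstIdx "Strength Potion" i l),
       r.orElse (fun _ => firstIdx "Resilience Potion" i l),
       h.orElse (fun _ => firstIdx "Healing Potion" i l)) := by
  induction l with
  | nil => intro i s r h; simp [scanPot, firstIdx]
  | cons item rest ih =>
    intro i s r h
    by_cases hall : s ≠ none ∧ r ≠ none ∧ h ≠ none
    · obtain ⟨hs, hr, hh⟩ := hall
      cases s with
      | none => exact absurd rfl hs
      | some sv =>
        cases r with
        | none => exact absurd rfl hr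
        | some rv =>
          cases h with
          | none => exact absurd rfl hh
          | some hv => simp [scanPot, Option.orElse]
    · simp only [scanPot, if_neg hall, ih]
      congr 1
      · cases s <;> by_cases hs : ((PySem.List.pyGet? item 1).getD "") = "Strength Potion" <;>
          simp [firstIdx, hs, Option.orElse]
      congr 1
      · cases r <;> by_cases hr : ((PySem.List.pyGet? item 1).getD "") = "Resilience Potion" <;>
          simp [firstIdx, hr, Option.orElse]
      · cases h <;> by_cases hh : ((PySem.List.pyGet? item 1).getD "") = "Healing Potion" <;>
          simp [firstIdx, hh, Option.orElse]

theorem firstIdx_getD (name : String) (l : List (List String)) : ∀ (i : Int),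
    (firstIdx name i l).getD (i + l.length) = i + countUntil name l := by
  induction l with
  | nil => intro i; simp [firstIdx, countUntil]
  | cons item rest ih =>
    intro i
    by_cases hm : ((PySem.List.pyGet? item 1).getD "") = name
    · simp [firstIdx, countUntil, hm]
    · simp only [firstIdx, countUntil, if_neg hm, if_pos hm, List.length_cons]
      have hcast : (i : Int) + ((rest.length + 1 : Nat) : Int) = (i + 1) + rest.length := by
        push_cast; ring
      rw [hcast, ih (i + 1)]; ring

-- ===== VERDICT (by name: the statement is the Claim_ definition above) =====
theorem indexPot_spec : Claim_equal_indexPot := by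
  intro inv _ _
  unfold Spec_indexPot indexPot indexPot_alt
  rw [scanPot_eq]
  have hs := firstIdx_getD "Strength Potion" inv 0
  have hr := firstIdx_getD "Resilience Potion" inv 0
  have hh := firstIdx_getD "Healing Potion" inv 0
  simp only [zero_add] at hs hr hh
  simp [Option.orElse, hs, hr, hh]
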